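-- pv_equiv track=rewrite | github.com/DennisXie/leetcode | python/502_ipo.py | findMaximizedCapital2
-- ===== SOURCE A (Python) =====
-- from typing import List
--
-- def findMaximizedCapital2(k: int, w: int, profits: List[int], capital: List[int]) -> int:
--     if w >= max(capital):
--         profits.sort(reverse=True)
--         return w + sum(profits[:k])
--
--     capital_profits = []
--     for i in range(len(profits)):
--         capital_profits.append((capital[i], profits[i]))
--
--     capital_profits.sort()
--     candidates = list()
--     last_j = 0
--     for i in range(k):
--         for j in range(last_j, len(capital_profits)):
--             if w >= capital_profits[j][0]:
--                 candidates.append(capital_profits[j][1])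
--             else:
--                 candidates.sort(reverse=True)
--                 break
--         else:
--             candidates.sort(reverse=True)
--             j += 1
--         last_j = j
--         candidates = candidates[:k-i]
--         if len(candidates) > 0:
--             w += candidates.pop(0)
--         else:
--             break
--     return w
-- ===== SOURCE B (Python) =====
-- def findMaximizedCapital2(k, w, profits, capital):
--     pairs = sorted(zip(capital, profits))
--     avail = []
--     i = 0
--     rounds = 0
--     while rounds < k:
--         while i < len(pairs) and pairs[i][0] <= w:
--             avail.append(pairs[i][1])
--             i += 1
--         if i == len(pairs):
--             # nothing further can unlock: take the best remaining picks outright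
--             avail.sort(reverse=True)
--             return w + sum(avail[:k - rounds])
--         if not avail:
--             return w
--         best = max(avail)
--         avail.remove(best)
--         w += best
--         rounds += 1
--     return w
-- ===== Notes on version B (the rewrite author's own statement) =====
-- stated objective: simpler
-- what changed: B replaces A's special fast-path branch and its per-round sort/truncate/pop-front maintenance of a candidate list by one uniform greedy loop: sort (capital, profit) pairs once, advance a pointer over the affordable ones, each round pick max(avail) and remove it, and once the pointer is exhausted finish by summing the best remaining picks outright.
-- outside the precondition, e.g. on findMaximizedCapital2(-1, 10, [5, 7, 2], [0, 0, 0]): A returns 22, B returns 10; on findMaximizedCapital2(1, 9, [1, 2], [5]): A returns 11, B returns 10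
import Mathlib
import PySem

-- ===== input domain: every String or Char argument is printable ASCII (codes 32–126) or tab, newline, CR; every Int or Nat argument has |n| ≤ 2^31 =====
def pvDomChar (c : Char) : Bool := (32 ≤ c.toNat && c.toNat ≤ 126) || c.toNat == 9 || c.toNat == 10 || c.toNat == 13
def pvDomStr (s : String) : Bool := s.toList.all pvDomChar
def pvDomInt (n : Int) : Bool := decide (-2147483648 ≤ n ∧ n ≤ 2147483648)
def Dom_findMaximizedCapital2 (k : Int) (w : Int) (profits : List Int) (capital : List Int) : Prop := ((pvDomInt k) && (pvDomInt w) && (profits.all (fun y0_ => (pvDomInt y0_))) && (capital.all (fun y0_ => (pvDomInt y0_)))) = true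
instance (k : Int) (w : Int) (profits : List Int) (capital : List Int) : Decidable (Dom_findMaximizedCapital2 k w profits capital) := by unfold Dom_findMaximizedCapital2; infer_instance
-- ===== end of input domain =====

-- B drops A's fast-path branch and its per-round sort/truncate of the candidate list: one uniform
-- greedy loop that scans affordable projects with a pointer and picks the max profit directly
-- (objective: simpler). Equivalence is about the RETURN value only: A sorts `profits` in place on
-- its fast-path branch; B never mutates its arguments.

-- ===== PORT A =====
-- inner `for j in range(last_j, n)` loop of A: collect affordable profits, return the collected
-- list and `some j` at the first unaffordable index (break) or `none` if the range is exhausted;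
-- `rest` is pairs[j:], kept alongside the running index j so Python's pairs[j] is rest's head
def aScan (rest : List (Int × Int)) (w : Int) (j : Nat) (acc : List Int) : List Int × Option Nat :=
  match rest with
  | [] => (acc, none)
  | p :: rs => if w ≥ p.1 then aScan rs w (j + 1) (acc ++ [p.2]) else (acc, some j)

-- outer `for i in range(k)` loop of A; fuel f = k - i (remaining rounds)
def aLoop (pairs : List (Int × Int)) (f : Nat) (w : Int) (cands : List Int) (lastj : Nat) : Int :=
  match f with
  | 0 => w
  | f + 1 =>
    let s := aScan (pairs.drop lastj) w lastj []
    -- Python sorts `candidates` descending both on break and on normal loop exit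
    let c' := PySem.List.sorted (cands ++ s.1) (fun x => x) true
    -- `last_j = j`: the break index, or (loop ran off the end / empty range) previous j + 1
    let lastj' := match s.2 with
      | some j0 => j0
      | none => if lastj < pairs.length then pairs.length else lastj + 1
    -- `candidates = candidates[:k-i]`, here k - i = f + 1
    let c'' := c'.take (f + 1)
    match c'' with
    | [] => w                                   -- `else: break`
    | b :: rest => aLoop pairs f (w + b) rest lastj'  -- `w += candidates.pop(0)`

def findMaximizedCapital2 (k : Int) (w : Int) (profits : List Int) (capital : List Int) : Int :=
  match PySem.List.max? capital (fun x => x) with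
  | none => w  -- Python raises ValueError (max of empty capital); excluded by Pre_
  | some m =>
    if w ≥ m then
      w + (PySem.List.slice (PySem.List.sorted profits (fun x => x) true) none (some k)).sum
    else
      let pairs := (PySem.List.pyRange 0 (PySem.List.len profits) 1).foldl
        (fun acc i => acc ++ [(PySem.List.pyGetD capital i 0, PySem.List.pyGetD profits i 0)]) []
      aLoop (PySem.List.sorted2 pairs (fun x => x.1) (fun x => x.2)) k.toNat w [] 0

-- ===== PORT B =====
-- B's `while i < len(pairs) and pairs[i][0] <= w` pointer scan, appending into avail;
-- `rest` is pairs[i:] so that `i < len(pairs) and pairs[i]` is rest's head test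
def bScan (rest : List (Int × Int)) (w : Int) (i : Nat) (avail : List Int) : List Int × Nat :=
  match rest with
  | [] => (avail, i)
  | p :: rs => if p.1 ≤ w then bScan rs w (i + 1) (avail ++ [p.2]) else (avail, i)

-- B's `while rounds < k` loop: scan; if the pointer is exhausted, take the best remaining
-- picks outright (`avail.sort(reverse=True); return w + sum(avail[:k-rounds])`, here k - rounds
-- = f + 1); else pick `max(avail)` and remove it
def bLoop (pairs : List (Int × Int)) (f : Nat) (w : Int) (i : Nat) (avail : List Int) : Int :=
  match f with
  | 0 => w
  | f + 1 =>
    let s := bScan (pairs.drop i) w i avail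
    if s.2 = pairs.length then
      w + ((PySem.List.sorted s.1 (fun x => x) true).take (f + 1)).sum
    else
      match PySem.List.max? s.1 (fun x => x) with
      | none => w                               -- `if not avail: return w`
      | some b => bLoop pairs f (w + b) s.2 ((PySem.List.remove? s.1 b).getD s.1)

def findMaximizedCapital2_alt (k : Int) (w : Int) (profits : List Int) (capital : List Int) : Int :=
  bLoop (PySem.List.sorted2 (List.zip capital profits) (fun x => x.1) (fun x => x.2)) k.toNat w 0 []

-- ===== PRECONDITION & SPEC =====
-- Pre_ restricts to the task's natural domain: a non-empty capital list at least as long as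
-- profits (A indexes capital[i] for every i < len(profits) and takes max(capital)), with two
-- corner carve-outs: when profits is empty, k >= 1 and some capital exceeds w, A stumbles on an
-- unbound loop variable; and a negative k is admitted only when some capital exceeds w (the slow
-- path, where the loop simply never runs in both programs) because on the fast path A's slice
-- profits[:k] then sums all but the last |k| profits.  On excluded inputs where A still RETURNS
-- (negative k with w >= max(capital), or profits longer than capital with w >= max(capital))
-- A's value comes from the slice profits[:k] over entries that have no capital requirement at
-- all; see claim cites.
def Pre_findMaximizedCapital2 (k : Int) (w : Int) (profits : List Int) (capital : List Int) : Prop :=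
  capital ≠ [] ∧ profits.length ≤ capital.length ∧ (k < 0 → ∃ c ∈ capital, w < c) ∧
    (profits = [] → 0 < k → ∀ c ∈ capital, c ≤ w)
instance (k : Int) (w : Int) (profits : List Int) (capital : List Int) : Decidable (Pre_findMaximizedCapital2 k w profits capital) := by unfold Pre_findMaximizedCapital2; infer_instance

def pvWitness_findMaximizedCapital2 : Int × Int × List Int × List Int := (2, 0, [1, 2], [1, 3])

def Spec_findMaximizedCapital2 (k : Int) (w : Int) (profits : List Int) (capital : List Int) (out : Int) : Prop := out = findMaximizedCapital2_alt k w profits capital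
instance (k : Int) (w : Int) (profits : List Int) (capital : List Int) (out : Int) : Decidable (Spec_findMaximizedCapital2 k w profits capital out) := by unfold Spec_findMaximizedCapital2; infer_instance

-- ===== CLAIM (what is proved, stated in full; the proofs are below) =====
def Claim_equal_findMaximizedCapital2 : Prop := ∀ (k : Int) (w : Int) (profits : List Int) (capital : List Int), Dom_findMaximizedCapital2 k w profits capital → Pre_findMaximizedCapital2 k w profits capital → Spec_findMaximizedCapital2 k w profits capital (findMaximizedCapital2 k w profits capital)


-- ===== LEMMAS AND PROOFS =====

-- abbreviation used only in the proofs below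
def sortDesc (l : List Int) : List Int := PySem.List.sorted l (fun x => x) true

theorem sortDesc_congr_perm {xs ys : List Int} (h : xs.Perm ys) : sortDesc xs = sortDesc ys := by
  exact List.Perm.eq_of_pairwise (fun a b _ _ h1 h2 => le_antisymm h2 h1)
    (PySem.List.sorted_pairwise_rev xs (fun x => x))
    (PySem.List.sorted_pairwise_rev ys (fun x => x))
    (((PySem.List.sorted_perm xs _ _).trans h).trans (PySem.List.sorted_perm ys _ _).symm)

theorem sortDesc_pairwise (l : List Int) : (sortDesc l).Pairwise (fun a b => b ≤ a) := by
  exact PySem.List.sorted_pairwise_rev l (fun x => x)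

theorem sortDesc_eq_self {l : List Int} (h : l.Pairwise (fun a b => b ≤ a)) : sortDesc l = l := by
  exact PySem.List.sorted_rev_eq_self_of_pairwise l (fun x => x) h

-- max(xs) is the head of the descending sort
theorem max?_eq_head_sortDesc (l : List Int) :
    PySem.List.max? l (fun x => x) = (sortDesc l).head? := by
  cases hL : sortDesc l with
  | nil =>
    have hl : l = [] := (PySem.List.sorted_eq_nil_iff l _ _).mp hL
    subst hl; rfl
  | cons b t =>
    have hbl : b ∈ l := (PySem.List.mem_sorted l _ _ b).mp (hL ▸ List.mem_cons_self)
    cases hm : PySem.List.max? l (fun x => x) with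
    | none =>
      have := (PySem.List.max?_eq_none_iff l (fun x => x)).mp hm
      subst this; simp at hbl
    | some m =>
      have h1 : b ≤ m := PySem.List.max?_isMax hm b hbl
      have h2 : m ≤ b := PySem.List.key_head_sorted_rev_ge l (fun x => x) hL m
        (PySem.List.max?_mem hm)
      simp [le_antisymm h1 h2]

-- removing max(xs) leaves, as a descending sort, the tail of the descending sort
theorem sortDesc_erase_head {l : List Int} {b : Int} {t : List Int}
    (hL : sortDesc l = b :: t) : sortDesc (l.erase b) = t := by
  have hperm : (l.erase b).Perm ((b :: t).erase b) :=
    List.Perm.erase b ((PySem.List.sorted_perm l (fun x => x) true).symm.trans (hL ▸ List.Perm.refl _))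
  rw [List.erase_cons_head] at hperm
  have hpt : t.Pairwise (fun a b => b ≤ a) :=
    ((hL ▸ sortDesc_pairwise l : (b :: t).Pairwise _)).tail
  exact (sortDesc_congr_perm hperm).trans (sortDesc_eq_self hpt)

-- inserting one element dominated by ≥ m elements does not change the top m
theorem take_insertBy_of_count {L : List Int} {d : Int} {m : Nat}
    (hs : L.Pairwise (fun a b => b ≤ a))
    (hc : m ≤ L.countP (fun y => decide (d ≤ y))) :
    (PySem.List.insertBy (fun a b => decide (b < a)) d L).take m = L.take m := by
  induction L generalizing m with
  | nil =>
    have : m = 0 := by simpa using hc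
    subst this; rfl
  | cons y t ih =>
    cases m with
    | zero => rfl
    | succ m' =>
      have hdy : d ≤ y := by
        have hpos : 0 < (y :: t).countP (fun y => decide (d ≤ y)) := by omega
        rcases List.countP_pos_iff.mp hpos with ⟨z, hz, hdz⟩
        rcases List.mem_cons.mp hz with rfl | hzt
        · exact of_decide_eq_true hdz
        · exact le_trans (of_decide_eq_true hdz) (List.rel_of_pairwise_cons hs hzt)
      have hby : decide (y < d) = false := by simp; omega
      have hct : m' ≤ t.countP (fun y => decide (d ≤ y)) := by
        have : (y :: t).countP (fun y => decide (d ≤ y)) = t.countP (fun y => decide (d ≤ y)) + 1 := by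
          rw [List.countP_cons]; simp [hdy]
        omega
      simp only [PySem.List.insertBy, hby, Bool.false_eq_true, if_false, List.take_succ_cons]
      rw [ih hs.tail hct]

theorem take_sortDesc_append_singleton {Y : List Int} {d : Int} {m : Nat}
    (hc : m ≤ Y.countP (fun y => decide (d ≤ y))) :
    (sortDesc (Y ++ [d])).take m = (sortDesc Y).take m := by
  have h1 : sortDesc (Y ++ [d])
      = PySem.List.insertBy (fun a b => decide (b < a)) d (sortDesc Y) := by
    show PySem.List.sorted (Y ++ [d]) (fun x => x) true = _
    rw [PySem.List.sorted_rev_eq_foldl_insertBy (Y ++ [d]) (fun x => x),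
      List.foldl_append, ← PySem.List.sorted_rev_eq_foldl_insertBy Y (fun x => x)]
    rfl
  rw [h1]
  exact take_insertBy_of_count (sortDesc_pairwise Y)
    (le_trans hc (le_of_eq (List.Perm.countP_eq _ (PySem.List.sorted_perm Y _ _)).symm))

theorem take_sortDesc_append_small {X D : List Int} {m : Nat}
    (h : ∀ d ∈ D, m ≤ X.countP (fun y => decide (d ≤ y))) :
    (sortDesc (X ++ D)).take m = (sortDesc X).take m := by
  induction D generalizing X with
  | nil => simp
  | cons d D' ih =>
    have hperm : (X ++ d :: D').Perm ((X ++ D') ++ [d]) := by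
      calc (X ++ d :: D').Perm (X ++ (D' ++ [d])) :=
            List.Perm.append_left X (List.perm_append_singleton d D').symm
        _ = (X ++ D') ++ [d] := (List.append_assoc X D' [d]).symm
    rw [sortDesc_congr_perm hperm, take_sortDesc_append_singleton
        (le_trans (h d List.mem_cons_self) (by rw [List.countP_append]; omega))]
    exact ih (fun d' hd' => h d' (List.mem_cons_of_mem d hd'))

-- KEY: if cands is the top-m of avail, then after adding the same new elements the top-m agree
theorem truncTop {cands avail new : List Int} {m : Nat}
    (hc : sortDesc cands = (sortDesc avail).take m) :
    (sortDesc (cands ++ new)).take m = (sortDesc (avail ++ new)).take m := by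
  by_cases hD : ((sortDesc avail).drop m) = []
  · -- nothing is cut off: cands is a permutation of all of avail
    have htk : (sortDesc avail).take m = sortDesc avail := by
      conv_rhs => rw [← List.take_append_drop m (sortDesc avail)]
      rw [hD, List.append_nil]
    have h1 : sortDesc cands = sortDesc avail := hc.trans htk
    have h2 := PySem.List.sorted_perm avail (fun x : Int => x) true
    rw [show PySem.List.sorted avail (fun x : Int => x) true = sortDesc avail from rfl, ← h1] at h2
    have hca : cands.Perm avail :=
      (PySem.List.sorted_perm cands (fun x : Int => x) true).symm.trans h2
    rw [sortDesc_congr_perm (hca.append_right new)]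
  · set L := sortDesc avail with hLdef
    set C := L.take m with hCdef
    set D := L.drop m with hDdef
    have hmL : m ≤ L.length := by
      by_contra hm
      exact hD (List.drop_eq_nil_of_le (by omega))
    have hCD : C ++ D = L := List.take_append_drop m L
    have hpermC : cands.Perm C := by
      have := PySem.List.sorted_perm cands (fun x : Int => x) true
      rw [show PySem.List.sorted cands (fun x : Int => x) true = sortDesc cands from rfl, hc] at this
      exact this.symm
    have h1 : sortDesc (cands ++ new) = sortDesc (C ++ new) :=
      sortDesc_congr_perm (hpermC.append_right new)
    have h2 : sortDesc (avail ++ new) = sortDesc ((C ++ new) ++ D) := by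
      apply sortDesc_congr_perm
      have e1 : (avail ++ new).Perm (L ++ new) :=
        ((PySem.List.sorted_perm avail (fun x : Int => x) true).symm.append_right new)
      have e2 : (L ++ new).Perm ((C ++ new) ++ D) := by
        rw [← hCD, List.append_assoc, List.append_assoc]
        exact List.Perm.append_left C List.perm_append_comm
      exact e1.trans e2
    rw [h1, h2]
    have hpw := sortDesc_pairwise avail
    rw [← hLdef, ← hCD, List.pairwise_append] at hpw
    refine (take_sortDesc_append_small (fun d hd => ?_)).symm
    have hallC : ∀ c ∈ C, decide (d ≤ c) = true := fun c hcC =>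
      decide_eq_true (hpw.2.2 c hcC d hd)
    have hlenC : C.length = m := by
      rw [hCdef, List.length_take]; omega
    calc m = C.countP (fun y => decide (d ≤ y)) := by
          rw [List.countP_eq_length.mpr hallC, hlenC]
      _ ≤ (C ++ new).countP (fun y => decide (d ≤ y)) := by
          rw [List.countP_append]; omega

-- scans: accumulator generalization and A-scan/B-scan correspondence
theorem aScan_acc (rest : List (Int × Int)) (w : Int) (j : Nat) (acc : List Int) :
    aScan rest w j acc = (acc ++ (aScan rest w j []).1, (aScan rest w j []).2) := by
  induction rest generalizing j acc with
  | nil => simp [aScan]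
  | cons p rs ih =>
    by_cases hw : w ≥ p.1
    · rw [aScan, if_pos hw, ih, aScan, if_pos hw]
      simp only [List.nil_append]
      rw [ih (j + 1) [p.2]]
      simp
    · rw [aScan, if_neg hw, aScan, if_neg hw]
      simp

theorem bScan_acc (rest : List (Int × Int)) (w : Int) (i : Nat) (acc : List Int) :
    bScan rest w i acc = (acc ++ (bScan rest w i []).1, (bScan rest w i []).2) := by
  induction rest generalizing i acc with
  | nil => simp [bScan]
  | cons p rs ih =>
    by_cases hw : p.1 ≤ w
    · rw [bScan, if_pos hw, ih, bScan, if_pos hw]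
      simp only [List.nil_append]
      rw [ih (i + 1) [p.2]]
      simp
    · rw [bScan, if_neg hw, bScan, if_neg hw]
      simp

theorem scan_rel (rest : List (Int × Int)) (w : Int) (j : Nat) :
    (bScan rest w j []).1 = (aScan rest w j []).1 ∧
    (bScan rest w j []).2 = ((aScan rest w j []).2).getD (j + rest.length) := by
  induction rest generalizing j with
  | nil => simp [aScan, bScan]
  | cons p rs ih =>
    by_cases hw : p.1 ≤ w
    · rw [bScan, if_pos hw, aScan, if_pos (by omega : w ≥ p.1)]
      rw [bScan_acc, aScan_acc]
      rcases ih (j + 1) with ⟨ih1, ih2⟩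
      refine ⟨by rw [ih1], ?_⟩
      rw [ih2]
      cases (aScan rs w (j + 1) []).2
      · simp; omega
      · simp
    · rw [bScan, if_neg hw, aScan, if_neg (by omega : ¬ w ≥ p.1)]
      simp

theorem aScan_stop {rest : List (Int × Int)} {w : Int} {j j0 : Nat}
    (h : (aScan rest w j []).2 = some j0) : j ≤ j0 ∧ j0 < j + rest.length := by
  induction rest generalizing j with
  | nil => simp [aScan] at h
  | cons p rs ih =>
    by_cases hw : w ≥ p.1
    · rw [aScan, if_pos hw, aScan_acc] at h
      have := ih h
      simp only [List.length_cons]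
      omega
    · rw [aScan, if_neg hw] at h
      simp only at h
      cases h
      simp only [List.length_cons]
      omega

theorem bScan_all (rest : List (Int × Int)) (w : Int) (j : Nat)
    (hall : ∀ p ∈ rest, p.1 ≤ w) :
    bScan rest w j [] = (rest.map Prod.snd, j + rest.length) := by
  induction rest generalizing j with
  | nil => simp [bScan]
  | cons p rs ih =>
    rw [bScan, if_pos (hall p List.mem_cons_self), bScan_acc,
      ih (j + 1) (fun q hq => hall q (List.mem_cons_of_mem p hq))]
    simp
    omega

-- A's loop once the pointer is past the end: it pops the sorted candidates one per round
theorem aLoop_end (pairs : List (Int × Int)) (f : Nat) (w : Int) (cands : List Int) (lastj : Nat)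
    (h : pairs.length ≤ lastj) :
    aLoop pairs f w cands lastj = w + ((sortDesc cands).take f).sum := by
  induction f generalizing w cands lastj with
  | zero => simp [aLoop]
  | succ f ih =>
    rw [aLoop, List.drop_eq_nil_of_le h,
      show aScan ([] : List (Int × Int)) w lastj [] = ([], none) from rfl]
    dsimp only
    rw [List.append_nil, if_neg (by omega : ¬ lastj < pairs.length)]
    cases hL : sortDesc cands with
    | nil =>
      rw [show PySem.List.sorted cands (fun x => x) true = sortDesc cands from rfl, hL]
      simp
    | cons b t =>
      rw [show PySem.List.sorted cands (fun x => x) true = sortDesc cands from rfl, hL,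
        List.take_succ_cons]
      dsimp only
      have hpt : t.Pairwise (fun a b => b ≤ a) :=
        ((hL ▸ sortDesc_pairwise cands : (b :: t).Pairwise _)).tail
      rw [ih (w + b) (t.take f) (lastj + 1) (by omega),
        sortDesc_eq_self (List.Pairwise.sublist (List.take_sublist f t) hpt),
        List.take_take, Nat.min_self, List.sum_cons]
      ring

-- fast path: everything affordable from the start
theorem bLoop_all (pairs : List (Int × Int)) (f : Nat) (w : Int)
    (hall : ∀ p ∈ pairs, p.1 ≤ w) :
    bLoop pairs f w 0 [] = w + ((sortDesc (pairs.map Prod.snd)).take f).sum := by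
  cases f with
  | zero => simp [bLoop]
  | succ f =>
    rw [bLoop]
    simp only [List.drop_zero]
    rw [bScan_acc, bScan_all pairs w 0 hall]
    simp only [List.nil_append, Nat.zero_add, if_true]
    rfl

-- A's pair building is zip
theorem pairsA_eq_zip (profits capital : List Int) (h : profits.length ≤ capital.length) :
    (PySem.List.pyRange 0 (PySem.List.len profits) 1).foldl
      (fun acc i => acc ++ [(PySem.List.pyGetD capital i 0, PySem.List.pyGetD profits i 0)]) []
    = List.zip capital profits := by
  rw [PySem.List.foldl_append_singleton_eq_map
    (fun i => (PySem.List.pyGetD capital i 0, PySem.List.pyGetD profits i 0))]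
  simp only [PySem.List.len_eq, List.nil_append]
  rw [show PySem.List.pyRange 0 (profits.length : Int) 1
      = PySem.List.pyRange 0 (profits.length : Int) from rfl,
    PySem.List.pyRange_zero_natCast, List.map_map]
  apply List.ext_getElem
  · simp [List.length_zip]
    omega
  · intro i h1 h2
    simp only [List.getElem_map, List.getElem_range, Function.comp_apply,
      PySem.List.pyGetD_natCast, List.getElem_zip]
    have hi : i < profits.length := by simpa using h1
    rw [List.getD_eq_getElem capital 0 (by omega), List.getD_eq_getElem profits 0 hi]

-- slow path: the two loops agree under the state invariant
theorem main_loop (pairs : List (Int × Int)) (f : Nat) (w : Int)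
    (cands avail : List Int) (lastj i : Nat)
    (hi : i = min lastj pairs.length)
    (hc : sortDesc cands = (sortDesc avail).take f) :
    aLoop pairs f w cands lastj = bLoop pairs f w i avail := by
  induction f generalizing w cands avail lastj i with
  | zero => rfl
  | succ f ih =>
    subst hi
    by_cases hln : lastj ≤ pairs.length
    · rw [aLoop, bLoop, Nat.min_eq_left hln]
      rw [bScan_acc]
      obtain ⟨hs1, hs2⟩ := scan_rel (pairs.drop lastj) w lastj
      rw [hs1, hs2]
      have hlendrop : lastj + (pairs.drop lastj).length = pairs.length := by
        rw [List.length_drop]; omega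
      rw [hlendrop]
      set A1 := (aScan (pairs.drop lastj) w lastj []).1 with hA1
      set A2 := (aScan (pairs.drop lastj) w lastj []).2 with hA2
      have hkey : (PySem.List.sorted (cands ++ A1) (fun x => x) true).take (f + 1)
          = (sortDesc (avail ++ A1)).take (f + 1) := truncTop hc
      rw [hkey]
      cases hA2v : A2 with
      | some j0 =>
        obtain ⟨hj1, hj2⟩ := aScan_stop (hA2 ▸ hA2v)
        rw [List.length_drop] at hj2
        dsimp only
        simp only [Option.getD_some]
        rw [if_neg (by omega : ¬ j0 = pairs.length)]
        cases hL' : sortDesc (avail ++ A1) with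
        | nil =>
          have hav : avail ++ A1 = [] := (PySem.List.sorted_eq_nil_iff _ _ _).mp hL'
          rw [hav]
          simp [PySem.List.max?]
        | cons b t =>
          have hmax : PySem.List.max? (avail ++ A1) (fun x => x) = some b := by
            rw [max?_eq_head_sortDesc, hL']; rfl
          rw [hmax, List.take_succ_cons]
          dsimp only
          have hbmem : b ∈ avail ++ A1 :=
            (PySem.List.mem_sorted _ _ _ b).mp (hL' ▸ List.mem_cons_self)
          rw [PySem.List.remove?_eq_some_erase _ b hbmem]
          simp only [Option.getD_some]
          have hpt : t.Pairwise (fun a b => b ≤ a) :=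
            ((hL' ▸ sortDesc_pairwise (avail ++ A1) : (b :: t).Pairwise _)).tail
          have hc' : sortDesc (t.take f) = (sortDesc ((avail ++ A1).erase b)).take f := by
            rw [sortDesc_erase_head hL']
            exact sortDesc_eq_self (List.Pairwise.sublist (List.take_sublist f t) hpt)
          exact ih (w + b) (t.take f) ((avail ++ A1).erase b) j0 j0 (by omega) hc'
      | none =>
        dsimp only
        simp only [Option.getD_none]
        rw [if_true]
        cases hL' : sortDesc (avail ++ A1) with
        | nil =>
          rw [show PySem.List.sorted (avail ++ A1) (fun x => x) true
              = sortDesc (avail ++ A1) from rfl, hL']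
          simp
        | cons b t =>
          rw [show PySem.List.sorted (avail ++ A1) (fun x => x) true
              = sortDesc (avail ++ A1) from rfl, hL', List.take_succ_cons]
          dsimp only
          have hpt : t.Pairwise (fun a b => b ≤ a) :=
            ((hL' ▸ sortDesc_pairwise (avail ++ A1) : (b :: t).Pairwise _)).tail
          have hend : pairs.length ≤ (if lastj < pairs.length then pairs.length else lastj + 1) := by
            split <;> omega
          rw [aLoop_end pairs f (w + b) (t.take f) _ hend,
            sortDesc_eq_self (List.Pairwise.sublist (List.take_sublist f t) hpt),
            List.take_take, Nat.min_self, List.sum_cons]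
          ring
    · -- pointer already past the end on A's side
      have hmin : min lastj pairs.length = pairs.length := by omega
      rw [hmin, aLoop_end pairs (f + 1) w cands lastj (by omega), bLoop]
      rw [List.drop_length,
        show bScan ([] : List (Int × Int)) w pairs.length avail = (avail, pairs.length) from rfl]
      dsimp only
      rw [if_pos rfl, show PySem.List.sorted avail (fun x => x) true = sortDesc avail from rfl,
        hc, List.take_take, Nat.min_self]

-- ===== VERDICT (by name: the statement is the Claim_ definition above) =====
theorem findMaximizedCapital2_spec : Claim_equal_findMaximizedCapital2 := by
  unfold Claim_equal_findMaximizedCapital2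
  intro k w profits capital _ hpre
  obtain ⟨hne, hlen, hkneg, -⟩ := hpre
  unfold Spec_findMaximizedCapital2 findMaximizedCapital2 findMaximizedCapital2_alt
  cases hm : PySem.List.max? capital (fun x => x) with
  | none => exact absurd ((PySem.List.max?_eq_none_iff capital _).mp hm) hne
  | some m =>
    dsimp only
    have hperm : (PySem.List.sorted2 (capital.zip profits) (fun x => x.1) (fun x => x.2)).Perm
        (capital.zip profits) := PySem.List.sorted2_perm _ _ _ _
    by_cases hw : w ≥ m
    · rw [if_pos hw]
      have hk : 0 ≤ k := by
        by_contra hkc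
        rcases hkneg (by omega) with ⟨c, hcmem, hcw⟩
        have := PySem.List.max?_isMax hm c hcmem
        simp only at this
        omega
      have hall : ∀ p ∈ PySem.List.sorted2 (capital.zip profits) (fun x => x.1) (fun x => x.2),
          p.1 ≤ w := by
        intro p hp
        obtain ⟨p1, p2⟩ := p
        have hz := hperm.mem_iff.mp hp
        exact le_trans (PySem.List.max?_isMax hm p1 (List.of_mem_zip hz).1) hw
      rw [bLoop_all _ k.toNat w hall, PySem.List.slice_to _ hk]
      have h2 : ((PySem.List.sorted2 (capital.zip profits) (fun x => x.1) (fun x => x.2)).map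
          Prod.snd).Perm profits := by
        have := hperm.map Prod.snd
        rwa [List.map_snd_zip hlen] at this
      rw [show PySem.List.sorted profits (fun x => x) true = sortDesc profits from rfl,
        ← sortDesc_congr_perm h2]
    · rw [if_neg hw, pairsA_eq_zip profits capital hlen]
      exact main_loop _ k.toNat w [] [] 0 0 (by simp) (by simp [sortDesc, PySem.List.sorted])
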